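-- pv_equiv track=rewrite | github.com/gabekanegae/advent-of-code | 2016/07_ipv7.py | supports_ssl
-- ===== SOURCE A (Python) =====
-- def split_nets(ipv7):
--     supernets, hypernets = [], []
--     for s in ipv7.split('['):
--         if ']' in s:
--             a, b = s.split(']')
--             hypernets.append(a)
--             supernets.append(b)
--         else:
--             supernets.append(s)
--
--     return supernets, hypernets
--
-- def supports_ssl(ipv7):
--     def get_aba(s):
--         abas = []
--         for i in range(len(s)-2):
--             if s[i] != s[i+1] and s[i] == s[i+2]:
--                 abas.append(s[i:i+3])
--
--         return abas
--
--     supernets, hypernets = split_nets(ipv7)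
--
--     subSupernets = []
--     for supernet in supernets:
--         subSupernets += get_aba(supernet)
--
--     subHypernets = []
--     for hypernet in hypernets:
--         subHypernets += get_aba(hypernet)
--
--     for s in subSupernets:
--         for h in subHypernets:
--             if s[0] == h[1] == s[2] and h[0] == s[1] == h[2]:
--                 return True
--
--     return False
-- ===== SOURCE B (Python) =====
-- def split_nets(ipv7):
--     supernets, hypernets = [], []
--     for s in ipv7.split('['):
--         if ']' in s:
--             a, b = s.split(']')
--             hypernets.append(a)
--             supernets.append(b)
--         else:
--             supernets.append(s)
--
--     return supernets, hypernets
--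
-- def supports_ssl(ipv7):
--     supernets, hypernets = split_nets(ipv7)
--     for s in supernets:
--         for i in range(len(s) - 2):
--             if s[i] != s[i + 1] and s[i] == s[i + 2]:
--                 bab = s[i + 1] + s[i] + s[i + 1]
--                 if any(bab in h for h in hypernets):
--                     return True
--     return False
-- ===== Notes on version B (the rewrite author's own statement) =====
-- stated objective: simpler
-- what changed: B drops A's two ABA-extraction passes and the nested ABA-vs-ABA comparison loop: it scans each supernet once and, at each ABA triple found, probes the hypernets directly for the bab substring, returning on the first hit.
import Mathlib
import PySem

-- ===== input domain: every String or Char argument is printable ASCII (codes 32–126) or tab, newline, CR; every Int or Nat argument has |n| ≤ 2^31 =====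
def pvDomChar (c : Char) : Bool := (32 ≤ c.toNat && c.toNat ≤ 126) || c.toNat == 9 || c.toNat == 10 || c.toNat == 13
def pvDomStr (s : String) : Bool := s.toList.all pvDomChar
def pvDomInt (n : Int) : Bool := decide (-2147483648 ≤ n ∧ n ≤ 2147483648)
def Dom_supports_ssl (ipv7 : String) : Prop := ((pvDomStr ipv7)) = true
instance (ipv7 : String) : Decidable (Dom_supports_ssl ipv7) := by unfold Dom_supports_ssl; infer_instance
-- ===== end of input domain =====

-- B replaces A's two ABA-extraction passes and the nested ABA×ABA comparison loop by a single
-- scan of each supernet that probes the hypernets directly for the matching bab substring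
-- (objective: simpler). Equality of return values is proved on Pre_ (A raises outside it).

-- ===== PORT A =====
-- shared helper: Python's split_nets (B's split_nets is textually identical in Source B)
def splitNets (ipv7 : List Char) : List (List Char) × List (List Char) :=
  (PySem.Chars.splitOn ipv7 ['[']).foldl
    (fun (acc : List (List Char) × List (List Char)) s =>
      if PySem.Chars.isIn [']'] s then
        -- the two-variable unpacking: exactly two pieces on Pre_
        match PySem.Chars.splitOn s [']'] with
        | a :: b :: _ => (acc.1 ++ [b], acc.2 ++ [a])
        | _ => acc      -- unreachable under Pre_ (Python raises ValueError there)
      else (acc.1 ++ [s], acc.2))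
    ([], [])

-- inner helper get_aba: scan of the length-3 windows, in order
def getAba : List Char → List (List Char)
  | a :: b :: c :: rest =>
      (if a ≠ b ∧ a = c then [[a, b, c]] else []) ++ getAba (b :: c :: rest)
  | _ => []

-- the final nested loop with its chained comparison (early return = any)
def abaMatch (subSup subHyp : List (List Char)) : Bool :=
  subSup.any fun s => subHyp.any fun h =>
    PySem.List.pyGetD s 0 ' ' == PySem.List.pyGetD h 1 ' ' &&
    PySem.List.pyGetD h 1 ' ' == PySem.List.pyGetD s 2 ' ' &&
    PySem.List.pyGetD h 0 ' ' == PySem.List.pyGetD s 1 ' ' &&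
    PySem.List.pyGetD s 1 ' ' == PySem.List.pyGetD h 2 ' '

def supports_ssl (ipv7 : String) : Bool :=
  let nets := splitNets ipv7.toList
  let subSupernets := nets.1.foldl (fun acc s => acc ++ getAba s) []
  let subHypernets := nets.2.foldl (fun acc h => acc ++ getAba h) []
  abaMatch subSupernets subHypernets

-- ===== PORT B =====
-- scan the windows of one supernet; at each ABA, probe all hypernets for bab
def babScan : List Char → List (List Char) → Bool
  | a :: b :: c :: rest, hyp =>
      (if a ≠ b ∧ a = c then hyp.any fun h => PySem.Chars.isIn [b, a, b] h else false)
        || babScan (b :: c :: rest) hyp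
  | _, _ => false

def supports_ssl_alt (ipv7 : String) : Bool :=
  let nets := splitNets ipv7.toList
  nets.1.any fun s => babScan s nets.2

-- ===== PRECONDITION & SPEC =====
-- Pre_ excludes exactly the inputs where A raises ValueError: a segment produced by the
-- opening-bracket split that contains more than one closing bracket makes the two-variable
-- unpacking in split_nets fail.
def Pre_supports_ssl (ipv7 : String) : Prop :=
  ∀ seg ∈ PySem.Chars.splitOn ipv7.toList ['['], PySem.Chars.count seg [']'] ≤ 1
instance (ipv7 : String) : Decidable (Pre_supports_ssl ipv7) := by
  unfold Pre_supports_ssl; infer_instance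

def pvWitness_supports_ssl : String := "aba[bab]xyz"

def Spec_supports_ssl (ipv7 : String) (out : Bool) : Prop := out = supports_ssl_alt ipv7
instance (ipv7 : String) (out : Bool) : Decidable (Spec_supports_ssl ipv7 out) := by
  unfold Spec_supports_ssl; infer_instance

-- ===== CLAIM (what is proved, stated in full; the proofs are below) =====
def Claim_equal_supports_ssl : Prop := ∀ (ipv7 : String), Dom_supports_ssl ipv7 → Pre_supports_ssl ipv7 → Spec_supports_ssl ipv7 (supports_ssl ipv7)

-- ===== LEMMAS AND PROOFS =====

-- getAba s holds exactly the a≠b windows [a,b,a] occurring in s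
lemma mem_getAba_iff (s x : List Char) :
    x ∈ getAba s ↔ ∃ a b, a ≠ b ∧ x = [a, b, a] ∧ [a, b, a] <:+: s := by
  induction s using getAba.induct with
  | case1 a b c rest ih =>
      simp only [getAba, List.mem_append]
      constructor
      · rintro (h | h)
        · split_ifs at h with hc
          · simp only [List.mem_singleton] at h
            rcases hc with ⟨hne, hac⟩
            subst hac
            exact ⟨a, b, hne, h, ⟨[], rest, rfl⟩⟩
          · simp at h
        · rcases ih.1 h with ⟨p, q, hne, hx, hinf⟩
          exact ⟨p, q, hne, hx, List.infix_cons hinf⟩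
      · rintro ⟨p, q, hne, hx, hinf⟩
        rcases List.infix_cons_iff.1 hinf with hpre | htail
        · rcases List.cons_prefix_cons.1 hpre with ⟨hp, hpre2⟩
          rcases List.cons_prefix_cons.1 hpre2 with ⟨hq, hpre3⟩
          rcases List.cons_prefix_cons.1 hpre3 with ⟨hp2, _⟩
          left
          subst hp hq hx
          rw [if_pos ⟨hne, hp2⟩]
          simp [hp2]
        · exact Or.inr (ih.2 ⟨p, q, hne, hx, htail⟩)
  | case2 t h1 =>
      obtain _ | ⟨u, _ | ⟨v, _ | ⟨w, r⟩⟩⟩ := t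
      · simp [getAba]
      · constructor
        · intro h; simp [getAba] at h
        · rintro ⟨p, q, _, _, hinf⟩; have := hinf.length_le; simp at this
      · constructor
        · intro h; simp [getAba] at h
        · rintro ⟨p, q, _, _, hinf⟩; have := hinf.length_le; simp at this
      · exact absurd rfl (fun e => h1 u v w r e)

-- babScan as a proposition
lemma babScan_iff (s : List Char) (hyp : List (List Char)) :
    babScan s hyp = true ↔
      ∃ a b, a ≠ b ∧ [a, b, a] <:+: s ∧ ∃ h ∈ hyp, PySem.Chars.isIn [b, a, b] h = true := by
  induction s using getAba.induct with
  | case1 a b c rest ih =>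
      simp only [babScan, Bool.or_eq_true, ih]
      constructor
      · rintro (h | ⟨p, q, hne, hinf, hh⟩)
        · split_ifs at h with hc
          · rcases hc with ⟨hne, hac⟩
            subst hac
            exact ⟨a, b, hne, ⟨[], rest, rfl⟩, by simpa using h⟩
        · exact ⟨p, q, hne, List.infix_cons hinf, hh⟩
      · rintro ⟨p, q, hne, hinf, hh⟩
        rcases List.infix_cons_iff.1 hinf with hpre | htail
        · rcases List.cons_prefix_cons.1 hpre with ⟨hp, hpre2⟩
          rcases List.cons_prefix_cons.1 hpre2 with ⟨hq, hpre3⟩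
          rcases List.cons_prefix_cons.1 hpre3 with ⟨hp2, _⟩
          left
          subst hp hq
          rw [if_pos ⟨hne, hp2⟩]
          simpa using hh
        · exact Or.inr ⟨p, q, hne, htail, hh⟩
  | case2 t h1 =>
      obtain _ | ⟨u, _ | ⟨v, _ | ⟨w, r⟩⟩⟩ := t
      · constructor
        · intro h; simp [babScan] at h
        · rintro ⟨p, q, _, hinf, _⟩; have := hinf.length_le; simp at this
      · constructor
        · intro h; simp [babScan] at h
        · rintro ⟨p, q, _, hinf, _⟩; have := hinf.length_le; simp at this
      · constructor
        · intro h; simp [babScan] at h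
        · rintro ⟨p, q, _, hinf, _⟩; have := hinf.length_le; simp at this
      · exact absurd rfl (fun e => h1 u v w r e)

-- the core: for ANY supernet/hypernet lists the two main loops agree
lemma main_eq (sup hyp : List (List Char)) :
    abaMatch (sup.foldl (fun acc s => acc ++ getAba s) [])
             (hyp.foldl (fun acc h => acc ++ getAba h) []) =
    sup.any (fun s => babScan s hyp) := by
  rw [PySem.List.foldl_append_eq_flatMap, PySem.List.foldl_append_eq_flatMap]
  simp only [List.nil_append, abaMatch, List.any_flatMap]
  apply Bool.eq_iff_iff.2
  simp only [List.any_eq_true]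
  constructor
  · rintro ⟨s, hs, x, hx, h, hh, y, hy, hcond⟩
    rcases (mem_getAba_iff s x).1 hx with ⟨a, b, hab, hxe, hxin⟩
    rcases (mem_getAba_iff h y).1 hy with ⟨c, d, hcd, hye, hyin⟩
    subst hxe hye
    -- chained condition forces y = [b,a,b]
    simp only [PySem.List.pyGetD, PySem.List.pyGet?, PySem.List.pyIdx?, Bool.and_eq_true,
      beq_iff_eq] at hcond
    norm_num at hcond
    obtain ⟨⟨⟨h1, h2⟩, h3⟩, h4⟩ := hcond
    refine ⟨s, hs, (babScan_iff s hyp).2 ⟨a, b, hab, hxin, h, hh, ?_⟩⟩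
    have : ([b, a, b] : List Char) = [c, d, c] := by simp [← h1, ← h3]
    rw [this, PySem.Chars.isIn_iff_infix]
    exact hyin
  · rintro ⟨s, hs, hscan⟩
    rcases (babScan_iff s hyp).1 hscan with ⟨a, b, hab, hxin, h, hh, hisin⟩
    refine ⟨s, hs, [a, b, a], (mem_getAba_iff s _).2 ⟨a, b, hab, rfl, hxin⟩,
      h, hh, [b, a, b], (mem_getAba_iff h _).2 ⟨b, a, fun e => hab e.symm, rfl,
        (PySem.Chars.isIn_iff_infix _ _).1 hisin⟩, ?_⟩
    simp [PySem.List.pyGetD, PySem.List.pyGet?, PySem.List.pyIdx?]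

-- ===== VERDICT (by name: the statement is the Claim_ definition above) =====
theorem supports_ssl_spec : Claim_equal_supports_ssl := by
  intro ipv7 _ _
  unfold Spec_supports_ssl supports_ssl supports_ssl_alt
  exact main_eq _ _
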